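-- pv_equiv track=rewrite | github.com/AliiiBenn/websearch | websearch/core/converter/security.py | is_dangerous_url
-- ===== SOURCE A (Python) =====
-- DANGEROUS_URL_SCHEMES = {"javascript", "data"}
--
-- def is_dangerous_url(url: str) -> bool:
--     """Check if URL has dangerous scheme.
--
--     Args:
--         url: URL to check
--
--     Returns:
--         True if URL has dangerous scheme
--     """
--     if not url:
--         return False
--     lower = url.lower().strip()
--     for scheme in DANGEROUS_URL_SCHEMES:
--         if lower.startswith(f"{scheme}:"):
--             return True
--     return False
-- ===== SOURCE B (Python) =====
-- def is_dangerous_url(url: str) -> bool: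
--     """Check if URL has dangerous scheme.
--
--     Args:
--         url: URL to check
--
--     Returns:
--         True if URL has dangerous scheme
--     """
--     # Multi-pattern prefix automaton: one pass over the characters,
--     # maintaining the set of still-alive pattern suffixes.
--     candidates = ["javascript:", "data:"]
--     for ch in url.lower().strip():
--         alive = []
--         for pat in candidates:
--             if pat[0] == ch:
--                 rest = pat[1:]
--                 if not rest:
--                     return True
--                 alive.append(rest)
--         if not alive:
--             return False
--         candidates = alive
--     return False
-- ===== Notes on version B (the rewrite author's own statement) =====
-- stated objective: alternative
-- what changed: B does a single pass over the normalized URL's characters simulating a multi-pattern prefix automaton (maintaining the list of still-alive pattern suffixes, with early accept/reject), instead of A's loop doing a separate startswith prefix test per dangerous scheme.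
import Mathlib
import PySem

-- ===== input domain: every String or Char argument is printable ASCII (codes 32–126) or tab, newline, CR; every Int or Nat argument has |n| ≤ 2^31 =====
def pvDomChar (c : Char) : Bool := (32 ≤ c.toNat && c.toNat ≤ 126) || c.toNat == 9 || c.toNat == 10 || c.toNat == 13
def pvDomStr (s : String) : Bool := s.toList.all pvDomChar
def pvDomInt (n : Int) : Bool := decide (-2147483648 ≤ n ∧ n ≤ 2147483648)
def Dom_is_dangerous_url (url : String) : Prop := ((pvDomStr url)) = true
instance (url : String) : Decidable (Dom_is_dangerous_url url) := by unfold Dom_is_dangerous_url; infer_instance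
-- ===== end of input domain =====

-- B replaces A's per-scheme startswith loop by a single pass over the characters that
-- maintains the set of still-alive pattern suffixes (a multi-pattern prefix automaton); same cost.

-- ===== PORT A =====
-- DANGEROUS_URL_SCHEMES = {"javascript", "data"} (a set of two distinct strings)
def pvDangerousSchemes : List String := ["javascript", "data"]

def is_dangerous_url (url : String) : Bool :=
  if url == "" then false
  else
    let lower := PySem.Str.strip (PySem.Str.lower url)
    pvDangerousSchemes.any (fun scheme => PySem.Str.startswith lower (scheme ++ ":"))

-- ===== PORT B =====
-- inner `for pat in candidates` loop of Source B; `none` models the early `return True`.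
-- (pat = [] is unreachable: candidates never contains an empty suffix, since an
-- emptied suffix triggers `return True` instead of being appended.)
def pvAlive (ch : Char) : List (List Char) → List (List Char) → Option (List (List Char))
  | [], acc => some acc
  | pat :: ps, acc =>
    match pat with
    | [] => pvAlive ch ps acc
    | p0 :: rest =>
      if p0 == ch then
        if rest = [] then none
        else pvAlive ch ps (acc ++ [rest])
      else pvAlive ch ps acc

-- outer `for ch in url.lower().strip()` loop of Source B
def pvScan : List Char → List (List Char) → Bool
  | [], _ => false
  | ch :: cs, cands =>
    match pvAlive ch cands [] with
    | none => true
    | some alive => if alive = [] then false else pvScan cs alive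

def is_dangerous_url_alt (url : String) : Bool :=
  pvScan (PySem.Str.strip (PySem.Str.lower url)).toList
    ["javascript:".toList, "data:".toList]

-- ===== PRECONDITION & SPEC =====
def Spec_is_dangerous_url (url : String) (out : Bool) : Prop := out = is_dangerous_url_alt url
instance (url : String) (out : Bool) : Decidable (Spec_is_dangerous_url url out) := by unfold Spec_is_dangerous_url; infer_instance

-- ===== CLAIM (what is proved, stated in full; the proofs are below) =====
def Claim_equal_is_dangerous_url : Prop := ∀ (url : String), Dom_is_dangerous_url url → Spec_is_dangerous_url url (is_dangerous_url url)

-- ===== LEMMAS AND PROOFS =====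

-- the one-step advance function the inner loop computes
def pvStep (ch : Char) (p : List Char) : Option (List Char) :=
  match p with
  | [] => none
  | p0 :: rest => if p0 = ch ∧ rest ≠ [] then some rest else none

theorem pvAlive_none_iff (ch : Char) (pats acc : List (List Char)) :
    pvAlive ch pats acc = none ↔ ∃ p ∈ pats, p = [ch] := by
  induction pats generalizing acc with
  | nil => simp [pvAlive]
  | cons pat ps ih =>
    cases pat with
    | nil => simp [pvAlive, ih]
    | cons p0 rest =>
      by_cases h0 : p0 = ch
      · subst h0
        by_cases hr : rest = []
        · subst hr; simp [pvAlive]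
        · simp [pvAlive, hr, ih]
      · simp [pvAlive, h0, ih]
        exact fun h' _ => absurd h'.symm h0

theorem pvAlive_some (ch : Char) (pats acc : List (List Char))
    (h : ¬ ∃ p ∈ pats, p = [ch]) :
    pvAlive ch pats acc = some (acc ++ pats.filterMap (pvStep ch)) := by
  induction pats generalizing acc with
  | nil => simp [pvAlive]
  | cons pat ps ih =>
    have hps : ¬ ∃ p ∈ ps, p = [ch] := fun ⟨p, hp, he⟩ => h ⟨p, List.mem_cons_of_mem _ hp, he⟩
    cases pat with
    | nil =>
      rw [show pvAlive ch ([] :: ps) acc = pvAlive ch ps acc from rfl, ih _ hps]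
      simp [pvStep]
    | cons p0 rest =>
      by_cases h0 : p0 = ch
      · have hr : rest ≠ [] := fun he => h ⟨p0 :: rest, List.mem_cons_self, by rw [he, h0]⟩
        rw [show pvAlive ch ((p0 :: rest) :: ps) acc
            = pvAlive ch ps (acc ++ [rest]) from by simp [pvAlive, h0, hr], ih _ hps]
        simp [pvStep, h0, hr]
      · rw [show pvAlive ch ((p0 :: rest) :: ps) acc = pvAlive ch ps acc from by
          simp [pvAlive, h0], ih _ hps]
        simp [pvStep, h0]

theorem pvScan_iff (cs : List Char) (pats : List (List Char))
    (hne : ∀ p ∈ pats, p ≠ []) :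
    pvScan cs pats = true ↔ ∃ p ∈ pats, p <+: cs := by
  induction cs generalizing pats with
  | nil =>
    simp only [pvScan, Bool.false_eq_true, false_iff]
    rintro ⟨p, hp, hpre⟩
    exact hne p hp (List.prefix_nil.mp hpre)
  | cons ch cs ih =>
    by_cases hm : ∃ p ∈ pats, p = [ch]
    · rw [show pvScan (ch :: cs) pats = true from by
        simp [pvScan, (pvAlive_none_iff ch pats []).mpr hm]]
      obtain ⟨p, hp, he⟩ := hm
      simp only [true_iff]
      exact ⟨p, hp, by rw [he]; exact ⟨cs, rfl⟩⟩
    · have hstep := pvAlive_some ch pats [] hm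
      have hne' : ∀ q ∈ pats.filterMap (pvStep ch), q ≠ [] := by
        intro q hq
        obtain ⟨p, _, hpq⟩ := List.mem_filterMap.mp hq
        cases p with
        | nil => simp [pvStep] at hpq
        | cons p0 rest =>
          simp only [pvStep] at hpq
          split_ifs at hpq with hc
          cases hpq; exact hc.2
      have hiff : (∃ q ∈ pats.filterMap (pvStep ch), q <+: cs) ↔ ∃ p ∈ pats, p <+: ch :: cs := by
        constructor
        · rintro ⟨q, hq, hpre⟩
          obtain ⟨p, hp, hpq⟩ := List.mem_filterMap.mp hq
          cases p with
          | nil => simp [pvStep] at hpq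
          | cons p0 rest =>
            simp only [pvStep] at hpq
            split_ifs at hpq with hc
            cases hpq
            refine ⟨p0 :: q, hp, ?_⟩
            obtain ⟨t, ht⟩ := hpre
            exact ⟨t, by rw [hc.1, List.cons_append, ht]⟩
        · rintro ⟨p, hp, hpre⟩
          cases p with
          | nil => exact absurd rfl (hne [] hp)
          | cons p0 rest =>
            obtain ⟨t, ht⟩ := hpre
            injection ht with h1 h2
            have hr : rest ≠ [] := by
              intro he
              exact hm ⟨p0 :: rest, hp, by rw [he, h1]⟩
            refine ⟨rest, List.mem_filterMap.mpr ⟨p0 :: rest, hp, ?_⟩, ⟨t, h2⟩⟩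
            simp [pvStep, h1, hr]
      by_cases hz : pats.filterMap (pvStep ch) = []
      · rw [show pvScan (ch :: cs) pats = false from by simp [pvScan, hstep, hz]]
        simp only [Bool.false_eq_true, false_iff]
        rw [← hiff, hz]
        simp
      · rw [show pvScan (ch :: cs) pats = pvScan cs (pats.filterMap (pvStep ch)) from by
          simp [pvScan, hstep, hz]]
        rw [ih _ hne', hiff]

-- ===== VERDICT (by name: the statement is the Claim_ definition above) =====
theorem is_dangerous_url_spec : Claim_equal_is_dangerous_url := by
  intro url _
  unfold Spec_is_dangerous_url is_dangerous_url is_dangerous_url_alt pvDangerousSchemes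
  by_cases h : url = ""
  · subst h; decide
  · have hne : (url == "") = false := by simpa using h
    simp only [hne, Bool.false_eq_true, if_false, List.any_cons, List.any_nil, Bool.or_false]
    rw [Bool.eq_iff_iff]
    simp only [Bool.or_eq_true, PySem.Str.startswith_eq, PySem.Chars.startswith_iff]
    rw [pvScan_iff _ _ (by decide)]
    have hjl : ("javascript" ++ ":" : String).toList = "javascript:".toList := by decide
    have hdl : ("data" ++ ":" : String).toList = "data:".toList := by decide
    rw [hjl, hdl]
    simp only [List.mem_cons, List.not_mem_nil, or_false, exists_eq_or_imp, exists_eq_left]
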